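-- pv_equiv track=rewrite | github.com/dbower44022/crmbuilder | espo_impl/core/layout_manager.py | _pair_fields
-- ===== SOURCE A (Python) =====
-- def _pair_fields(names: list[str]) -> list[list]:
--     """Pair field names into rows of 2, padding the last if odd.
--
--     :param names: List of field names.
--     :returns: List of rows.
--     """
--     rows: list[list] = []
--     for i in range(0, len(names), 2):
--         pair = names[i:i + 2]
--         if len(pair) == 1:
--             pair.append(None)
--         rows.append(pair)
--     return rows
-- ===== SOURCE B (Python) =====
-- def _pair_fields(names: list[str]) -> list[list]:
--     """Pair field names into rows of 2, padding the last if odd.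
--
--     Single element-wise pass keeping a current row, instead of an
--     index-strided slicing loop.
--     """
--     rows: list[list] = []
--     row: list = []
--     for name in names:
--         row.append(name)
--         if len(row) == 2:
--             rows.append(row)
--             row = []
--     if row:
--         row.append(None)
--         rows.append(row)
--     return rows
-- ===== Notes on version B (the rewrite author's own statement) =====
-- stated objective: alternative
-- what changed: Replaces A's index loop over range(0, len, 2) with per-iteration slicing by a single element-wise pass that accumulates the current row and flushes it every two elements, padding the leftover row at the end; no indexing or slicing at all.
import Mathlib
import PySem

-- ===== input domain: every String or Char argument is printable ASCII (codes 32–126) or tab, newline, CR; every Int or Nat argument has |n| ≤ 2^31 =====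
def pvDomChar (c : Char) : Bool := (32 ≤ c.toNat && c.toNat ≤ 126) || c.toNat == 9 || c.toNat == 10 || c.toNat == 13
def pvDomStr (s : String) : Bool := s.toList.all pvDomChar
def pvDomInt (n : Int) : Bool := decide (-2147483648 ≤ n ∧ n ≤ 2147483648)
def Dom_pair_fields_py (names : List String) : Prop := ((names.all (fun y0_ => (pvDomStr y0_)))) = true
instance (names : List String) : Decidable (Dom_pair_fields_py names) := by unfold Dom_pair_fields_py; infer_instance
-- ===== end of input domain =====

-- B replaces A's strided-index slicing loop with a single element-wise pass
-- accumulating the current row (objective: alternative decomposition).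

-- ===== PORT A =====
-- loop body of A: pair = names[i:i+2]; if len(pair)==1: pair.append(None); rows.append(pair)
def stepA (full : List String) (rows : List (List (Option String))) (i : Int) : List (List (Option String)) :=
  let pair : List (Option String) := (PySem.List.slice full (some i) (some (i + 2))).map some
  let pair := if pair.length = 1 then pair ++ [none] else pair
  rows ++ [pair]

def pair_fields_py (names : List String) : List (List (Option String)) :=
  (PySem.List.pyRange 0 (names.length : Int) 2).foldl (stepA names) []

-- ===== PORT B =====
-- loop body of B: row.append(name); if len(row)==2: rows.append(row); row=[]
def stepB (acc : List (List (Option String)) × List (Option String)) (name : String) :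
    List (List (Option String)) × List (Option String) :=
  let row := acc.2 ++ [some name]
  if row.length = 2 then (acc.1 ++ [row], ([] : List (Option String))) else (acc.1, row)

def pair_fields_py_alt (names : List String) : List (List (Option String)) :=
  let st := names.foldl stepB ([], [])
  if st.2 ≠ [] then st.1 ++ [st.2 ++ [none]] else st.1

-- ===== PRECONDITION & SPEC =====
def Spec_pair_fields_py (names : List String) (out : List (List (Option String))) : Prop := out = pair_fields_py_alt names
instance (names : List String) (out : List (List (Option String))) : Decidable (Spec_pair_fields_py names out) := by unfold Spec_pair_fields_py; infer_instance

-- ===== CLAIM (what is proved, stated in full; the proofs are below) =====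
def Claim_equal_pair_fields_py : Prop := ∀ (names : List String), Dom_pair_fields_py names → Spec_pair_fields_py names (pair_fields_py names)

-- ===== LEMMAS AND PROOFS =====

-- reference pairing: both ports are proved equal to it
def pairRec : List String → List (List (Option String))
  | [] => []
  | [x] => [[some x, none]]
  | x :: y :: r => [some x, some y] :: pairRec r

lemma pyRange_two_nil (a b : Int) (h : b ≤ a) : PySem.List.pyRange a b 2 = [] := by
  rw [PySem.List.pyRange_of_pos _ _ (by norm_num)]
  simp [show ¬ a < b from not_lt.mpr h]

lemma pyRange_two_cons (a b : Int) (h : a < b) :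
    PySem.List.pyRange a b 2 = a :: PySem.List.pyRange (a + 2) b 2 := by
  rw [PySem.List.pyRange_of_pos _ _ (by norm_num : (0:Int) < 2),
      PySem.List.pyRange_of_pos _ _ (by norm_num : (0:Int) < 2)]
  have hc : (if a < b then ((b - a + 2 - 1) / 2).toNat else 0)
      = (if a + 2 < b then ((b - (a + 2) + 2 - 1) / 2).toNat else 0) + 1 := by
    split_ifs <;> omega
  rw [hc, List.range_succ_eq_map, List.map_cons, List.map_map]
  congr 1
  · ring
  · refine List.map_congr_left fun k _ => ?_
    simp only [Function.comp, Nat.succ_eq_add_one]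
    push_cast
    ring

lemma slice_two (full : List String) (k : Nat) :
    PySem.List.slice full (some (2 * (k : Int))) (some (2 * (k : Int) + 2))
      = (full.drop (2 * k)).take 2 := by
  have h := PySem.List.slice_natCast_add full (2 * k) 2
  push_cast at h
  exact h

lemma foldA (rest : List String) (full : List String) (a : Int) (k : Nat)
    (acc : List (List (Option String)))
    (ha : a = ((2 * k : Nat) : Int)) (hd : full.drop (2 * k) = rest) (hk : 2 * k ≤ full.length) :
    (PySem.List.pyRange a (full.length : Int) 2).foldl (stepA full) acc = acc ++ pairRec rest := by
  induction rest using pairRec.induct generalizing a k acc with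
  | case1 =>
    have hlen : full.length = 2 * k := by
      have := List.drop_eq_nil_iff.mp hd
      omega
    rw [pyRange_two_nil _ _ (by omega)]
    simp [pairRec]
  | case2 x =>
    have hlen : full.length = 2 * k + 1 := by
      have := congrArg List.length hd
      simp [List.length_drop] at this
      omega
    rw [pyRange_two_cons _ _ (by omega), pyRange_two_nil _ _ (by omega)]
    simp only [List.foldl_cons, List.foldl_nil, stepA]
    rw [ha]
    push_cast
    rw [slice_two, hd]
    simp [pairRec]
  | case3 x y r ih =>
    have hlen : 2 * k + 2 ≤ full.length := by
      have := congrArg List.length hd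
      simp [List.length_drop] at this
      omega
    rw [pyRange_two_cons _ _ (by omega)]
    simp only [List.foldl_cons]
    have hstep : stepA full acc a = acc ++ [[some x, some y]] := by
      simp only [stepA]
      rw [ha]
      push_cast
      rw [slice_two, hd]
      simp
    rw [hstep]
    have hd' : full.drop (2 * (k + 1)) = r := by
      have : full.drop (2 * (k + 1)) = (full.drop (2 * k)).drop 2 := by
        rw [List.drop_drop]; ring_nf
      rw [this, hd]; rfl
    have := ih (a + 2) (k + 1) (acc ++ [[some x, some y]]) (by push_cast at ha ⊢; omega) hd' (by omega)
    rw [this, pairRec]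
    simp

lemma A_eq_pairRec (names : List String) : pair_fields_py names = pairRec names := by
  unfold pair_fields_py
  exact foldA names names 0 0 [] (by norm_num) (by simp) (by omega)

lemma foldB (rest : List String) (rows : List (List (Option String))) :
    (let st := rest.foldl stepB (rows, ([] : List (Option String)))
     if st.2 ≠ [] then st.1 ++ [st.2 ++ [none]] else st.1) = rows ++ pairRec rest := by
  induction rest using pairRec.induct generalizing rows with
  | case1 => simp [pairRec]
  | case2 x => simp [stepB, pairRec]
  | case3 x y r ih =>
    simp only [List.foldl_cons]
    have h1 : stepB (rows, ([] : List (Option String))) x = (rows, [some x]) := by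
      simp [stepB]
    have h2 : stepB (rows, [some x]) y = (rows ++ [[some x, some y]], []) := by
      simp [stepB]
    rw [h1, h2, ih]
    simp [pairRec]

lemma B_eq_pairRec (names : List String) : pair_fields_py_alt names = pairRec names := by
  unfold pair_fields_py_alt
  simpa using foldB names []

-- ===== VERDICT (by name: the statement is the Claim_ definition above) =====
theorem pair_fields_py_spec : Claim_equal_pair_fields_py := by
  intro names _
  unfold Spec_pair_fields_py
  rw [A_eq_pairRec, B_eq_pairRec]
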